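-- pv_equiv track=rewrite | github.com/Daniel-Lobo/SEO-Dashboard | dashboard/content_creator.py | SplitSetence
-- ===== SOURCE A (Python) =====
-- def SplitSetence(setence):
--     if setence.startswith('#'):
--         split = setence.split(' ')
--         if len(split) >= 2:
--             if split[0] == ''.join(['#' for char in split[0]]):
--                 prefix = split[0] + ' '
--                 return setence.replace(split[0] + ' ', '', 1), prefix
--     return setence, ''
-- ===== SOURCE B (Python) =====
-- def SplitSetence(setence):
--     n = len(setence)
--     k = 0
--     while k < n and setence[k] == '#':
--         k += 1
--     if 1 <= k < n and setence[k] == ' ':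
--         return setence[k+1:], setence[:k+1]
--     return setence, ''
-- ===== Notes on version B (the rewrite author's own statement) =====
-- stated objective: simpler
-- what changed: A detects and strips the '#'-prefix via startswith, split(' '), an all-'#' join test and replace(...,1); B does one left-to-right scan counting the leading '#' run and checks that the next character is a space, then slices.
import Mathlib
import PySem

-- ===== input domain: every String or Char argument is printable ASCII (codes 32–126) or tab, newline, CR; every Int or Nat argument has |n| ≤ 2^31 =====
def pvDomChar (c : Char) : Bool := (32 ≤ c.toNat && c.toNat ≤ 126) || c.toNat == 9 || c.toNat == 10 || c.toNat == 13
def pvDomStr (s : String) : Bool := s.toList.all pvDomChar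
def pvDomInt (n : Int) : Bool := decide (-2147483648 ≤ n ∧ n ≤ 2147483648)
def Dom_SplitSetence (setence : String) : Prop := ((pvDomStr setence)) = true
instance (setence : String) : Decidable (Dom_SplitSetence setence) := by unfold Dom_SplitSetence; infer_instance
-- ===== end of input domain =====

-- B replaces A's startswith/split/join/replace pipeline by a single left-to-right scan that
-- counts the leading '#' run and checks the next character (objective: simpler, same cost).

-- ===== PORT A =====
-- hand port of setence.replace(old, '', 1): PySem.Chars.replace has no count argument.
-- Exact: Python removes the FIRST occurrence of old (none -> unchanged); for old = '' it
-- inserts '' once, i.e. unchanged, matched by find s [] = 0 and removing 0 characters.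
def pvReplaceOnce (s old : List Char) : List Char :=
  let i := PySem.Chars.find s old
  if i < 0 then s else s.take i.toNat ++ s.drop (i.toNat + old.length)

def SplitSetence (setence : String) : String × String :=
  let s := setence.toList
  if PySem.Chars.startswith s ['#'] then
    let sp := PySem.Chars.splitOn s [' ']              -- setence.split(' ')
    if 2 ≤ sp.length then
      let h := sp.headD []                             -- split[0]; split(' ') is never empty
      if h = PySem.Chars.join [] (h.map (fun _ => ['#'])) then  -- ''.join(['#' for char in split[0]])
        (String.ofList (pvReplaceOnce s (h ++ [' '])), String.ofList (h ++ [' ']))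
      else (setence, "")
    else (setence, "")
  else (setence, "")

-- ===== PORT B =====
-- the 'while k < n and setence[k] == "#"' scan of Source B
def pvCountHash : List Char → Nat
  | [] => 0
  | c :: rest => if c = '#' then pvCountHash rest + 1 else 0

def SplitSetence_alt (setence : String) : String × String :=
  let s := setence.toList
  let k := pvCountHash s
  if 1 ≤ k ∧ k < s.length ∧ s[k]? = some ' ' then      -- 1 <= k < n and setence[k] == ' '
    (String.ofList (s.drop (k + 1)), String.ofList (s.take (k + 1)))  -- setence[k+1:], setence[:k+1] (bounds ≥ 0: slice = drop/take)
  else (setence, "")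

-- ===== PRECONDITION & SPEC =====
def Spec_SplitSetence (setence : String) (out : String × String) : Prop := out = SplitSetence_alt setence
instance (setence : String) (out : String × String) : Decidable (Spec_SplitSetence setence out) := by unfold Spec_SplitSetence; infer_instance

-- ===== CLAIM (what is proved, stated in full; the proofs are below) =====
def Claim_equal_SplitSetence : Prop := ∀ (setence : String), Dom_SplitSetence setence → Spec_SplitSetence setence (SplitSetence setence)

-- ===== LEMMAS AND PROOFS =====

-- pvCountHash s counts a maximal leading run of '#'
lemma pvCountHash_spec (s : List Char) :
    ∃ t, s = List.replicate (pvCountHash s) '#' ++ t ∧ t.head? ≠ some '#' := by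
  induction s with
  | nil => exact ⟨[], by simp [pvCountHash]⟩
  | cons c rest ih =>
    by_cases hc : c = '#'
    · obtain ⟨t, ht, hh⟩ := ih
      exact ⟨t, by simp [pvCountHash, hc, List.replicate_succ]; exact ht, hh⟩
    · exact ⟨c :: rest, by simp [pvCountHash, hc], by simp [hc]⟩

-- splitOn.go facts (PySem.Chars.splitOn s sep = go sep (s.length+1) s [] [])
lemma go_nil (fuel : Nat) (cur : List Char) (acc : List (List Char)) :
    PySem.Chars.splitOn.go [' '] fuel [] cur acc = (cur.reverse :: acc).reverse := by
  cases fuel <;> simp [PySem.Chars.splitOn.go]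

lemma go_step_sep (fuel : Nat) (rest cur : List Char) (acc : List (List Char)) :
    PySem.Chars.splitOn.go [' '] (fuel + 1) (' ' :: rest) cur acc
      = PySem.Chars.splitOn.go [' '] fuel rest [] (cur.reverse :: acc) := by
  simp [PySem.Chars.splitOn.go]

lemma go_step_cons (fuel : Nat) (c : Char) (hc : c ≠ ' ') (rest cur : List Char)
    (acc : List (List Char)) :
    PySem.Chars.splitOn.go [' '] (fuel + 1) (c :: rest) cur acc
      = PySem.Chars.splitOn.go [' '] fuel rest (c :: cur) acc := by
  simp [PySem.Chars.splitOn.go, List.isPrefixOf, Ne.symm hc]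

lemma go_no_sep (l : List Char) (hl : ' ' ∉ l) :
    ∀ (fuel : Nat) (cur : List Char) (acc : List (List Char)),
      PySem.Chars.splitOn.go [' '] (l.length + fuel) l cur acc
        = ((cur.reverse ++ l) :: acc).reverse := by
  induction l with
  | nil => intro fuel cur acc; simpa using go_nil fuel cur acc
  | cons c rest ih =>
    intro fuel cur acc
    have hc : c ≠ ' ' := fun h => hl (h ▸ List.mem_cons_self)
    have : (c :: rest).length + fuel = (rest.length + fuel) + 1 := by simp; omega
    rw [this, go_step_cons _ c hc,
        ih (fun h => hl (List.mem_cons_of_mem _ h)) (fuel) (c :: cur) acc]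
    simp

lemma go_after_pre (pre : List Char) (hp : ' ' ∉ pre) :
    ∀ (rest : List Char) (fuel : Nat) (cur : List Char) (acc : List (List Char)),
      PySem.Chars.splitOn.go [' '] (pre.length + 1 + fuel) (pre ++ ' ' :: rest) cur acc
        = PySem.Chars.splitOn.go [' '] fuel rest [] ((cur.reverse ++ pre) :: acc) := by
  induction pre with
  | nil =>
    intro rest fuel cur acc
    have h1 : ([] : List Char).length + 1 + fuel = fuel + 1 := by simp; omega
    rw [h1, List.nil_append, go_step_sep]; simp
  | cons c pre' ih =>
    intro rest fuel cur acc
    have hc : c ≠ ' ' := fun h => hp (h ▸ List.mem_cons_self)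
    have : (c :: pre').length + 1 + fuel = (pre'.length + 1 + fuel) + 1 := by simp; omega
    rw [this, List.cons_append, go_step_cons _ c hc,
        ih (fun h => hp (List.mem_cons_of_mem _ h)) rest fuel (c :: cur) acc]
    simp

lemma go_ne_nil (fuel : Nat) :
    ∀ (l cur : List Char) (acc : List (List Char)),
      ∃ t, t ≠ [] ∧ PySem.Chars.splitOn.go [' '] fuel l cur acc = acc.reverse ++ t := by
  induction fuel with
  | zero => intro l cur acc; exact ⟨[cur.reverse ++ l], by simp, by simp [PySem.Chars.splitOn.go]⟩
  | succ fuel ih =>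
    intro l cur acc
    match l with
    | [] => exact ⟨[cur.reverse], by simp, by rw [go_nil]; simp⟩
    | c :: rest =>
      by_cases hc : c = ' '
      · subst hc
        obtain ⟨t, ht, he⟩ := ih rest [] (cur.reverse :: acc)
        exact ⟨cur.reverse :: t, by simp, by rw [go_step_sep, he]; simp⟩
      · obtain ⟨t, ht, he⟩ := ih rest (c :: cur) acc
        exact ⟨t, ht, by rw [go_step_cons _ c hc, he]⟩

lemma splitOn_no_sep (s : List Char) (hl : ' ' ∉ s) :
    PySem.Chars.splitOn s [' '] = [s] := by
  show PySem.Chars.splitOn.go [' '] (s.length + 1) s [] [] = [s]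
  rw [go_no_sep s hl 1 [] []]; simp

lemma splitOn_pre (pre rest : List Char) (hp : ' ' ∉ pre) :
    ∃ t, t ≠ [] ∧ PySem.Chars.splitOn (pre ++ ' ' :: rest) [' '] = pre :: t := by
  show ∃ t, t ≠ [] ∧
    PySem.Chars.splitOn.go [' '] ((pre ++ ' ' :: rest).length + 1) (pre ++ ' ' :: rest) [] []
      = pre :: t
  have hlen : (pre ++ ' ' :: rest).length + 1 = pre.length + 1 + (rest.length + 1) := by
    simp; omega
  rw [hlen, go_after_pre pre hp rest (rest.length + 1) [] []]
  simp only [List.reverse_nil, List.nil_append]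
  obtain ⟨t, ht, he⟩ := go_ne_nil (rest.length + 1) rest [] [pre]
  exact ⟨t, ht, by rw [he]; simp⟩

lemma join_hashes (l : List Char) :
    PySem.Chars.join [] (l.map (fun _ => ['#'])) = List.replicate l.length '#' := by
  rw [List.map_const',
      show List.replicate l.length ['#'] = (List.replicate l.length '#').map (fun c => [c]) by
        simp]
  exact PySem.Chars.join_nil_singletons _

lemma find_of_prefix (s old : List Char) (h : old <+: s) : PySem.Chars.find s old = 0 := by
  have hnn : 0 ≤ PySem.Chars.find s old := (PySem.Chars.find_nonneg_iff s old).mpr h.isInfix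
  obtain ⟨_, hmin⟩ := PySem.Chars.find_spec hnn
  by_contra hne
  have hpos : 0 < (PySem.Chars.find s old).toNat := by omega
  exact hmin 0 hpos (by simpa using h)

-- ===== VERDICT (by name: the statement is the Claim_ definition above) =====
theorem SplitSetence_spec : Claim_equal_SplitSetence := by
  intro setence _
  show SplitSetence setence = SplitSetence_alt setence
  obtain ⟨t, hs, hh⟩ := pvCountHash_spec setence.toList
  generalize hk : pvCountHash setence.toList = k at hs
  simp only [SplitSetence, SplitSetence_alt, hk]
  rw [hs]
  cases t with
  | nil =>
    -- setence is exactly a run of '#' (possibly empty): both fall through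
    rw [if_neg (show ¬(1 ≤ k ∧ k < (List.replicate k '#' ++ ([] : List Char)).length ∧
        (List.replicate k '#' ++ ([] : List Char))[k]? = some ' ') by simp)]
    cases k with
    | zero => simp [PySem.Chars.startswith]
    | succ m =>
      rw [if_pos (show PySem.Chars.startswith
            (List.replicate (m + 1) '#' ++ ([] : List Char)) ['#'] = true by
          simp [List.replicate_succ, PySem.Chars.startswith, List.isPrefixOf]),
        splitOn_no_sep _ (by intro hm; simp at hm)]
      simp
  | cons c r =>
    have hch : c ≠ '#' := by simpa using hh
    by_cases hcsp : c = ' '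
    · subst hcsp
      cases k with
      | zero =>
        -- no leading '#': A's startswith and B's 1 ≤ k both fail
        rw [if_neg (show ¬(1 ≤ 0 ∧ 0 < (List.replicate 0 '#' ++ ' ' :: r).length ∧
              (List.replicate 0 '#' ++ ' ' :: r)[0]? = some ' ') by simp),
          if_neg (show ¬PySem.Chars.startswith (List.replicate 0 '#' ++ ' ' :: r) ['#'] = true by
            simp [PySem.Chars.startswith, List.isPrefixOf])]
      | succ m =>
        -- ≥ 1 hashes then a space: both strip the prefix
        rw [if_pos (show 1 ≤ m + 1 ∧ m + 1 < (List.replicate (m+1) '#' ++ ' ' :: r).length ∧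
              (List.replicate (m+1) '#' ++ ' ' :: r)[m+1]? = some ' ' by
            refine ⟨by omega, by simp, ?_⟩
            rw [List.getElem?_append_right (by simp)]; simp),
          if_pos (show PySem.Chars.startswith (List.replicate (m+1) '#' ++ ' ' :: r) ['#'] = true by
            simp [List.replicate_succ, PySem.Chars.startswith, List.isPrefixOf])]
        have hnp : ' ' ∉ List.replicate (m+1) '#' := by
          intro hm; simpa using List.eq_of_mem_replicate hm
        obtain ⟨tl, htl, hsp⟩ := splitOn_pre (List.replicate (m+1) '#') r hnp
        rw [hsp, if_pos (show 2 ≤ (List.replicate (m+1) '#' :: tl).length by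
          cases tl with | nil => exact absurd rfl htl | cons a b => simp)]
        simp only [List.headD_cons]
        rw [join_hashes, List.length_replicate, if_pos rfl]
        have hfind := find_of_prefix (List.replicate (m+1) '#' ++ ' ' :: r)
          (List.replicate (m+1) '#' ++ [' ']) ⟨r, by simp⟩
        unfold pvReplaceOnce
        rw [hfind]
        simp [List.take_append, List.drop_append, List.replicate_succ]
    · -- the char after the '#'-run is neither '#' nor ' ': both fall through
      rw [if_neg (show ¬(1 ≤ k ∧ k < (List.replicate k '#' ++ c :: r).length ∧
            (List.replicate k '#' ++ c :: r)[k]? = some ' ') by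
          rw [List.getElem?_append_right (by simp)]; simp [hcsp])]
      cases k with
      | zero =>
        rw [if_neg (show ¬PySem.Chars.startswith (List.replicate 0 '#' ++ c :: r) ['#'] = true by
          simp [PySem.Chars.startswith, List.isPrefixOf]
          exact fun h => hch h.symm)]
      | succ m =>
        rw [if_pos (show PySem.Chars.startswith (List.replicate (m+1) '#' ++ c :: r) ['#'] = true by
          simp [List.replicate_succ, PySem.Chars.startswith, List.isPrefixOf])]
        by_cases hsep : ' ' ∈ List.replicate (m+1) '#' ++ c :: r
        · -- a later space exists: split[0] contains c ≠ '#', the all-'#' test fails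
          have hsep' : ' ' ∈ r := by
            rcases List.mem_append.mp hsep with hm | hm
            · exact absurd (List.eq_of_mem_replicate hm) (by decide)
            · rcases List.mem_cons.mp hm with hm | hm
              · exact absurd hm.symm hcsp
              · exact hm
          have hdw : r.dropWhile (fun x => !(x == ' ')) ≠ [] := by
            intro hnil
            have := List.dropWhile_eq_nil_iff.mp hnil ' ' hsep'
            simp at this
          have hsplitr : r.takeWhile (fun x => !(x == ' ')) ++ r.dropWhile (fun x => !(x == ' '))
              = r := List.takeWhile_append_dropWhile
          have hdhead : (r.dropWhile (fun x => !(x == ' '))).head? = some ' ' := by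
            have h2 := List.head?_dropWhile_not (fun x => !(x == ' ')) r
            match hd : (r.dropWhile (fun x => !(x == ' '))).head? with
            | none => exact absurd (List.head?_eq_none_iff.mp hd) hdw
            | some e =>
              rw [hd] at h2; simp at h2; rw [h2]
          obtain ⟨d', hd'⟩ : ∃ d', r.dropWhile (fun x => !(x == ' ')) = ' ' :: d' := by
            match hd : r.dropWhile (fun x => !(x == ' ')) with
            | [] => exact absurd hd hdw
            | e :: d' =>
              rw [hd] at hdhead; simp at hdhead; exact ⟨d', by rw [hdhead]⟩
          set w := r.takeWhile (fun x => !(x == ' ')) with hwdef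
          have hwns : ' ' ∉ List.replicate (m+1) '#' ++ c :: w := by
            intro hm
            rcases List.mem_append.mp hm with hm | hm
            · exact absurd (List.eq_of_mem_replicate hm) (by decide)
            · rcases List.mem_cons.mp hm with hm | hm
              · exact absurd hm.symm hcsp
              · have := List.mem_takeWhile_imp (hwdef ▸ hm); simp at this
          obtain ⟨tl, htl, hsp⟩ := splitOn_pre (List.replicate (m+1) '#' ++ c :: w) d' hwns
          have hseq : List.replicate (m+1) '#' ++ c :: r
              = (List.replicate (m+1) '#' ++ c :: w) ++ ' ' :: d' := by
            conv_lhs => rw [← hsplitr]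
            rw [hd']; simp
          rw [hseq, hsp, if_pos (show 2 ≤ ((List.replicate (m+1) '#' ++ c :: w) :: tl).length by
            cases tl with | nil => exact absurd rfl htl | cons a b => simp)]
          simp only [List.headD_cons]
          rw [join_hashes, if_neg (show List.replicate (m+1) '#' ++ c :: w
              ≠ List.replicate (List.replicate (m+1) '#' ++ c :: w).length '#' by
            intro he
            have hcmem : c ∈ List.replicate (m+1) '#' ++ c :: w := by simp
            exact hch (List.eq_of_mem_replicate (he ▸ hcmem)))]
        · rw [splitOn_no_sep _ hsep]; simp
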